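-- pv_equiv track=rewrite | github.com/nuno887/final_version | spacy_modulo/Entities.py | _iter_bold_pairs_no_merge_III
-- ===== SOURCE A (Python) =====
-- def _iter_bold_pairs_no_merge_III(text: str):
--     """
--     Yield primitive bold pairs without merging across whitespace.
--     Returns (outer_start, inner_start, inner_end, outer_end) for each **...**.
--     """
--     n = len(text)
--     i = 0
--     while i < n:
--         open_idx = text.find("**", i)
--         if open_idx == -1:
--             break
--         inner_start = open_idx + 2
--         close_idx = text.find("**", inner_start)
--         if close_idx == -1:
--             break
--         yield open_idx, inner_start, close_idx, close_idx + 2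
--         i = close_idx + 2
-- ===== SOURCE B (Python) =====
-- def _iter_bold_pairs_no_merge_III(text: str):
--     """Split on the marker: text.split('**') yields the segments between the
--     non-overlapping '**' occurrences; marker positions are prefix sums of the
--     segment lengths, and consecutive positions are paired up."""
--     segs = text.split("**")
--     pos = []
--     acc = 0
--     for seg in segs[:-1]:
--         acc += len(seg)
--         pos.append(acc)
--         acc += 2
--     it = iter(pos)
--     for a, b in zip(it, it):
--         yield a, a + 2, b, b + 2
-- ===== Notes on version B (the rewrite author's own statement) =====
-- stated objective: alternative
-- what changed: Replaces A's while-loop of repeated text.find calls by str.split on the bold marker: the split segments determine the marker positions as prefix sums of segment lengths, which are then paired up; no search loop remains.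
import Mathlib
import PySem

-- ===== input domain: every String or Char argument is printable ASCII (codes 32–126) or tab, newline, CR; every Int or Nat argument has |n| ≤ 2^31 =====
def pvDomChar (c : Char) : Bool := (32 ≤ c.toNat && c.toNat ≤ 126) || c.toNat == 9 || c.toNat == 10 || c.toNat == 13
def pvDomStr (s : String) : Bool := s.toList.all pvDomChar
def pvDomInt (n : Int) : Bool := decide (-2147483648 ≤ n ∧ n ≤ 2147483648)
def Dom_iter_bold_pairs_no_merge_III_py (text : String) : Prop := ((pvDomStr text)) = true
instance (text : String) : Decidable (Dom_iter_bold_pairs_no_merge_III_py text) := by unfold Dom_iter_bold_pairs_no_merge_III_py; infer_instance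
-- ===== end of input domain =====

-- B replaces A's while-loop of repeated text.find calls by str.split on the bold marker: the split
-- segments determine the marker positions as prefix sums of segment lengths, which are
-- then paired up (objective: alternative — a different algorithm, not claimed faster).

-- ===== PORT A =====
-- Termination fact the port's loop needs: a successful find at start k points at a
-- full "**" occurrence at index ≥ k, so the next start strictly increases.
lemma pvFindFrom_window (s : List Char) (k : Nat) (hk : k ≤ s.length)
    (h : PySem.Chars.findFrom s ['*','*'] (k : Int) none ≠ -1) :
    (k : Int) ≤ PySem.Chars.findFrom s ['*','*'] (k : Int) none ∧
    (PySem.Chars.findFrom s ['*','*'] (k : Int) none).toNat + 2 ≤ s.length := by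
  obtain ⟨h1, h2, -⟩ := PySem.Chars.findFrom_natCast_spec s ['*','*'] k hk h
  refine ⟨h1, ?_⟩
  have := h2.length_le
  simp [List.length_drop] at this
  omega

-- while i < n: open_idx = text.find("**", i); …; close_idx = text.find("**", open_idx+2); …
def pvLoopA (s : List Char) (i : Nat) : List (Int × Int × Int × Int) :=
  if _h : i < s.length then
    let o := PySem.Chars.findFrom s ['*','*'] (i : Int) none
    if ho : o = -1 then []
    else
      let c := PySem.Chars.findFrom s ['*','*'] (o + 2) none
      if hc : c = -1 then []
      else (o, o + 2, c, c + 2) :: pvLoopA s (c + 2).toNat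
  else []
termination_by s.length - i
decreasing_by
  have ho1 : PySem.Chars.findFrom s ['*','*'] (i : Int) none ≠ -1 := ho
  have hc1 : PySem.Chars.findFrom s ['*','*']
      (PySem.Chars.findFrom s ['*','*'] (i : Int) none + 2) none ≠ -1 := hc
  obtain ⟨h1, h2⟩ := pvFindFrom_window s i (le_of_lt _h) ho1
  have hc2 : (PySem.Chars.findFrom s ['*','*'] (i : Int) none) + 2
      = (((PySem.Chars.findFrom s ['*','*'] (i : Int) none).toNat + 2 : Nat) : Int) := by omega
  rw [hc2] at hc1 ⊢
  obtain ⟨h3, _⟩ := pvFindFrom_window s _ h2 hc1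
  omega

def iter_bold_pairs_no_merge_III_py (text : String) : List (Int × Int × Int × Int) :=
  pvLoopA text.toList 0

-- ===== PORT B =====
-- the prefix-sum pass of Source B: acc += len(seg); pos.append(acc); acc += 2
def pvPosFold (segs : List (List Char)) : Nat × List Nat :=
  segs.foldl (fun st seg => (st.1 + seg.length + 2, st.2 ++ [st.1 + seg.length])) (0, [])

-- zip(it, it) of Source B — pair consecutive positions
def pvPair : List Nat → List (Int × Int × Int × Int)
  | a :: b :: rest => ((a : Int), (a : Int) + 2, (b : Int), (b : Int) + 2) :: pvPair rest
  | _ => []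

def iter_bold_pairs_no_merge_III_py_alt (text : String) : List (Int × Int × Int × Int) :=
  let segs := PySem.Chars.splitOn text.toList ['*','*']
  pvPair (pvPosFold (PySem.List.slice segs none (some (-1)))).2

-- ===== PRECONDITION & SPEC =====
def Spec_iter_bold_pairs_no_merge_III_py (text : String) (out : List (Int × Int × Int × Int)) : Prop := out = iter_bold_pairs_no_merge_III_py_alt text
instance (text : String) (out : List (Int × Int × Int × Int)) : Decidable (Spec_iter_bold_pairs_no_merge_III_py text out) := by unfold Spec_iter_bold_pairs_no_merge_III_py; infer_instance

-- ===== CLAIM (what is proved, stated in full; the proofs are below) =====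
def Claim_equal_iter_bold_pairs_no_merge_III_py : Prop := ∀ (text : String), Dom_iter_bold_pairs_no_merge_III_py text → Spec_iter_bold_pairs_no_merge_III_py text (iter_bold_pairs_no_merge_III_py text)

-- ===== LEMMAS AND PROOFS =====

-- find points at k when there is an occurrence at k and none before
lemma pvFind_eq_of (s sub : List Char) (k : Nat) (hpre : sub <+: s.drop k)
    (hmin : ∀ i < k, ¬ sub <+: s.drop i) : PySem.Chars.find s sub = (k : Int) := by
  have hinf : sub <:+: s := hpre.isInfix.trans (List.drop_suffix k s).isInfix
  have h0 : 0 ≤ PySem.Chars.find s sub := (PySem.Chars.find_nonneg_iff s sub).mpr hinf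
  obtain ⟨hp, hm⟩ := PySem.Chars.find_spec h0
  rcases lt_trichotomy (PySem.Chars.find s sub).toNat k with h | h | h
  · exact absurd hp (hmin _ h)
  · omega
  · exact absurd hpre (hm k h)

lemma pvFind_cons_shift (a : Char) (tl sub : List Char) (h : ¬ sub <+: a :: tl) :
    PySem.Chars.find (a :: tl) sub =
      if PySem.Chars.find tl sub = -1 then -1 else PySem.Chars.find tl sub + 1 := by
  by_cases htl : PySem.Chars.find tl sub = -1
  · rw [if_pos htl]
    have hninf : ¬ sub <:+: tl := (PySem.Chars.find_eq_neg_one_iff tl sub).mp htl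
    refine (PySem.Chars.find_eq_neg_one_iff _ sub).mpr ?_
    intro hin
    rcases List.infix_cons_iff.mp hin with h' | h'
    · exact h h'
    · exact hninf h'
  · rw [if_neg htl]
    have h0 : 0 ≤ PySem.Chars.find tl sub := by
      have := PySem.Chars.neg_one_le_find tl sub; omega
    obtain ⟨hp, hm⟩ := PySem.Chars.find_spec h0
    have := pvFind_eq_of (a :: tl) sub ((PySem.Chars.find tl sub).toNat + 1)
      (by simpa using hp)
      (by
        intro i hi
        cases i with
        | zero => simpa using h
        | succ i' => simpa using hm i' (by omega))
    rw [this]; omega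

-- bound needed by the recursions below: a hit of "**" at j means j + 2 ≤ length
lemma pvFind_window (cs : List Char) (h : PySem.Chars.find cs ['*','*'] ≠ -1) :
    0 ≤ PySem.Chars.find cs ['*','*'] ∧ (PySem.Chars.find cs ['*','*']).toNat + 2 ≤ cs.length := by
  have h0 : 0 ≤ PySem.Chars.find cs ['*','*'] := by
    have := PySem.Chars.neg_one_le_find cs ['*','*']; omega
  obtain ⟨hp, -⟩ := PySem.Chars.find_spec h0
  have := hp.length_le
  simp [List.length_drop] at this
  exact ⟨h0, by omega⟩

-- reference recursion: the segments text.split("**") produces, phrased via find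
def pvSplitSpec (cs : List Char) : List (List Char) :=
  if h : PySem.Chars.find cs ['*','*'] = -1 then [cs]
  else cs.take (PySem.Chars.find cs ['*','*']).toNat ::
       pvSplitSpec (cs.drop ((PySem.Chars.find cs ['*','*']).toNat + 2))
termination_by cs.length
decreasing_by
  obtain ⟨h0, h2⟩ := pvFind_window cs h
  simp [List.length_drop]
  omega

-- reference recursion: the non-overlapping marker positions from base b, phrased via find
def pvMarkers (cs : List Char) (b : Nat) : List Nat :=
  if h : PySem.Chars.find cs ['*','*'] = -1 then []
  else (b + (PySem.Chars.find cs ['*','*']).toNat) ::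
       pvMarkers (cs.drop ((PySem.Chars.find cs ['*','*']).toNat + 2))
                 (b + (PySem.Chars.find cs ['*','*']).toNat + 2)
termination_by cs.length
decreasing_by
  obtain ⟨h0, h2⟩ := pvFind_window cs h
  simp [List.length_drop]
  omega

lemma pvMarkers_nil_of_find (cs : List Char) (b : Nat)
    (h : PySem.Chars.find cs ['*','*'] = -1) : pvMarkers cs b = [] := by
  rw [pvMarkers, dif_pos h]

lemma pvMarkers_cons_of_find (cs : List Char) (b : Nat)
    (h : PySem.Chars.find cs ['*','*'] ≠ -1) :
    pvMarkers cs b = (b + (PySem.Chars.find cs ['*','*']).toNat) ::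
      pvMarkers (cs.drop ((PySem.Chars.find cs ['*','*']).toNat + 2))
                (b + (PySem.Chars.find cs ['*','*']).toNat + 2) := by
  rw [pvMarkers, dif_neg h]

lemma pvSplitSpec_ne_nil (cs : List Char) : pvSplitSpec cs ≠ [] := by
  rw [pvSplitSpec]
  split <;> simp

-- the fueled scanner behind PySem.Chars.splitOn computes pvSplitSpec
lemma pvGo_eq (fuel : Nat) : ∀ (l cur : List Char) (acc : List (List Char)),
    l.length < fuel →
    PySem.Chars.splitOn.go ['*','*'] fuel l cur acc
      = acc.reverse ++ List.modifyHead (cur.reverse ++ ·) (pvSplitSpec l) := by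
  induction fuel with
  | zero => intro l cur acc h; omega
  | succ fuel ih =>
    intro l cur acc h
    match l with
    | [] =>
      rw [PySem.Chars.splitOn.go]
      rw [pvSplitSpec]
      have : PySem.Chars.find ([] : List Char) ['*','*'] = -1 := by decide
      simp [this]
      omega
    | c :: rest =>
      rw [PySem.Chars.splitOn.go]
      by_cases hp : (['*','*'] : List Char).isPrefixOf (c :: rest) = true
      · rw [if_pos hp]
        have hpre : (['*','*'] : List Char) <+: c :: rest := List.isPrefixOf_iff_prefix.mp hp
        have hf : PySem.Chars.find (c :: rest) ['*','*'] = (0 : Int) := by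
          exact pvFind_eq_of (c :: rest) ['*','*'] 0 (by simpa using hpre)
            (fun i hi => absurd hi (Nat.not_lt_zero i))
        have hlen : (List.drop 2 (c :: rest)).length < fuel := by
          simp [List.length_drop] at h ⊢; omega
        have hL : (['*','*'] : List Char).length = 2 := rfl
        rw [hL, ih (List.drop 2 (c :: rest)) [] (List.reverse cur :: acc) hlen]
        conv_rhs => rw [pvSplitSpec]
        rw [dif_neg (by rw [hf]; norm_num)]
        simp [hf]
        exact congrFun List.modifyHead_id _
      · rw [if_neg hp]
        have hnp : ¬ (['*','*'] : List Char) <+: c :: rest := by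
          intro hk; exact hp (List.isPrefixOf_iff_prefix.mpr hk)
        have hlen : rest.length < fuel := by simp at h; omega
        rw [ih rest (c :: cur) acc hlen]
        have hshift := pvFind_cons_shift c rest ['*','*'] hnp
        congr 1
        by_cases hr : PySem.Chars.find rest ['*','*'] = -1
        · rw [if_pos hr] at hshift
          conv_lhs => rw [pvSplitSpec]
          conv_rhs => rw [pvSplitSpec]
          rw [dif_pos hr, dif_pos hshift]
          simp
        · rw [if_neg hr] at hshift
          have h0 : 0 ≤ PySem.Chars.find rest ['*','*'] := by
            have := PySem.Chars.neg_one_le_find rest ['*','*']; omega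
          conv_lhs => rw [pvSplitSpec]
          conv_rhs => rw [pvSplitSpec]
          rw [dif_neg hr, dif_neg (by rw [hshift]; omega)]
          have ht : (PySem.Chars.find (c :: rest) ['*','*']).toNat
              = (PySem.Chars.find rest ['*','*']).toNat + 1 := by rw [hshift]; omega
          simp [ht, List.take_succ_cons, List.drop_succ_cons]

lemma pvSplitOn_eq (cs : List Char) :
    PySem.Chars.splitOn cs ['*','*'] = pvSplitSpec cs := by
  rw [PySem.Chars.splitOn, pvGo_eq (cs.length + 1) cs [] [] (by omega)]
  rcases hs : pvSplitSpec cs with _ | ⟨x, xs⟩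
  · exact absurd hs (pvSplitSpec_ne_nil cs)
  · simp

-- Python segs[:-1] is dropLast
lemma pvSlice_dropLast (l : List (List Char)) :
    PySem.List.slice l none (some (-1)) = l.dropLast := by
  simp [PySem.List.slice, List.dropLast_eq_take]

-- the prefix-sum fold over the split segments produces exactly the marker positions
lemma pvFold_markers (cs : List Char) : ∀ (b : Nat) (l0 : List Nat),
    ((pvSplitSpec cs).dropLast.foldl
        (fun st seg => (st.1 + seg.length + 2, st.2 ++ [st.1 + seg.length])) (b, l0)).2
      = l0 ++ pvMarkers cs b := by
  fun_induction pvSplitSpec cs with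
  | case1 cs h =>
    intro b l0
    rw [pvMarkers_nil_of_find cs b h]
    simp
  | case2 cs h ih =>
    intro b l0
    obtain ⟨h0, h2⟩ := pvFind_window cs h
    set j := (PySem.Chars.find cs ['*','*']).toNat with hj
    have htk : (cs.take j).length = j := by simp; omega
    rcases hs : pvSplitSpec (cs.drop (j + 2)) with _ | ⟨x, xs⟩
    · exact absurd hs (pvSplitSpec_ne_nil _)
    · rw [← hs]
      have hdl : (cs.take j :: pvSplitSpec (cs.drop (j + 2))).dropLast
          = cs.take j :: (pvSplitSpec (cs.drop (j + 2))).dropLast := by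
        rw [hs]; rfl
      rw [hdl, List.foldl_cons, htk, ih (b + j + 2) (l0 ++ [b + j])]
      rw [pvMarkers_cons_of_find cs b h, ← hj]
      simp

-- main loop invariant: A's loop from i equals pairing the markers of the suffix from i
lemma pvMain (s : List Char) (d : Nat) : ∀ i : Nat, s.length - i ≤ d → i ≤ s.length →
    pvLoopA s i = pvPair (pvMarkers (s.drop i) i) := by
  induction d with
  | zero =>
      intro i hd hi
      have : i = s.length := by omega
      subst this
      rw [pvLoopA, dif_neg (lt_irrefl s.length), List.drop_length,
         pvMarkers_nil_of_find [] s.length (by decide)]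
      rfl
  | succ d ih =>
      intro i hd hi
      by_cases hlt : i < s.length
      · rw [pvLoopA, dif_pos hlt]
        have hff := PySem.Chars.findFrom_natCast s ['*','*'] i hi
        by_cases hj1 : PySem.Chars.find (s.drop i) ['*','*'] = -1
        · rw [hff, if_pos hj1]
          simp only [dif_pos]
          rw [pvMarkers_nil_of_find _ _ hj1]
          rfl
        · have hff' : PySem.Chars.findFrom s ['*','*'] (i : Int) none
              = (i : Int) + PySem.Chars.find (s.drop i) ['*','*'] := by rw [hff, if_neg hj1]
          have h0 : 0 ≤ PySem.Chars.find (s.drop i) ['*','*'] := by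
            have := PySem.Chars.neg_one_le_find (s.drop i) ['*','*']; omega
          set j1 : Nat := (PySem.Chars.find (s.drop i) ['*','*']).toNat with hj1def
          have hfo : PySem.Chars.findFrom s ['*','*'] (i : Int) none = ((i + j1 : Nat) : Int) := by
            rw [hff']; omega
          have hone : PySem.Chars.findFrom s ['*','*'] (i : Int) none ≠ -1 := by
            rw [hfo]; omega
          obtain ⟨-, hlen1'⟩ := pvFind_window (s.drop i) hj1
          have hlen1 : i + j1 + 2 ≤ s.length := by
            simp [List.length_drop] at hlen1'
            omega
          rw [dif_neg hone]
          have hstart2 : PySem.Chars.findFrom s ['*','*'] (i : Int) none + 2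
              = ((i + j1 + 2 : Nat) : Int) := by rw [hfo]; push_cast; ring
          rw [hstart2]
          have hff2 := PySem.Chars.findFrom_natCast s ['*','*'] (i + j1 + 2) hlen1
          -- markers of the suffix: first marker at i + j1
          have htoks := pvMarkers_cons_of_find (s.drop i) i hj1
          rw [← hj1def] at htoks
          rw [List.drop_drop] at htoks
          have hdix : i + (j1 + 2) = i + j1 + 2 := by omega
          rw [hdix] at htoks
          by_cases hj2 : PySem.Chars.find (s.drop (i + j1 + 2)) ['*','*'] = -1
          · rw [hff2, if_pos hj2]
            simp only [dif_pos]
            rw [htoks, pvMarkers_nil_of_find _ _ hj2]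
            rfl
          · have h02 : 0 ≤ PySem.Chars.find (s.drop (i + j1 + 2)) ['*','*'] := by
              have := PySem.Chars.neg_one_le_find (s.drop (i + j1 + 2)) ['*','*']; omega
            set j2 : Nat := (PySem.Chars.find (s.drop (i + j1 + 2)) ['*','*']).toNat with hj2def
            have hfc : PySem.Chars.findFrom s ['*','*'] ((i + j1 + 2 : Nat) : Int) none
                = ((i + j1 + 2 + j2 : Nat) : Int) := by
              rw [hff2, if_neg hj2]; omega
            have hcne : PySem.Chars.findFrom s ['*','*'] ((i + j1 + 2 : Nat) : Int) none ≠ -1 := by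
              rw [hfc]; omega
            rw [dif_neg hcne]
            obtain ⟨-, hlen2'⟩ := pvFind_window (s.drop (i + j1 + 2)) hj2
            have hlen2 : i + j1 + 2 + j2 + 2 ≤ s.length := by
              simp [List.length_drop] at hlen2'
              omega
            -- markers: second marker at i + j1 + 2 + j2
            have htoks2 := pvMarkers_cons_of_find (s.drop (i + j1 + 2)) (i + j1 + 2) hj2
            rw [← hj2def, List.drop_drop] at htoks2
            have hdix2 : i + j1 + 2 + (j2 + 2) = i + j1 + 2 + j2 + 2 := by omega
            rw [hdix2] at htoks2
            rw [htoks, htoks2]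
            have hnext : (PySem.Chars.findFrom s ['*','*'] ((i + j1 + 2 : Nat) : Int) none + 2).toNat
                = i + j1 + 2 + j2 + 2 := by rw [hfc]; omega
            rw [hnext]
            have hrec := ih (i + j1 + 2 + j2 + 2) (by omega) hlen2
            rw [hrec]
            simp only [pvPair, hfo, hfc]
            push_cast
            rfl
      · have : i = s.length := by omega
        subst this
        rw [pvLoopA, dif_neg (lt_irrefl s.length), List.drop_length,
           pvMarkers_nil_of_find [] s.length (by decide)]
        rfl

-- ===== VERDICT (by name: the statement is the Claim_ definition above) =====
theorem iter_bold_pairs_no_merge_III_py_spec : Claim_equal_iter_bold_pairs_no_merge_III_py := by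
  intro text _
  unfold Spec_iter_bold_pairs_no_merge_III_py iter_bold_pairs_no_merge_III_py
    iter_bold_pairs_no_merge_III_py_alt
  simp only [pvSplitOn_eq, pvSlice_dropLast, pvPosFold]
  rw [pvFold_markers text.toList 0 []]
  have := pvMain text.toList text.toList.length 0 (by omega) (by omega)
  simpa using this
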